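-- pv_equiv track=rewrite | github.com/vaibhav-jain-dev/learning-algo | problems/200-must-solve/arrays/04-tournament-winner/similar/01-tournament-bracket/python_code.py | tournament_bracket_winner_with_history
-- ===== SOURCE A (Python) =====
-- from typing import List
--
-- def tournament_bracket_winner_with_history(
--     bracket: List[List[str]],
--     results: List[List[int]],
--     finals_result: int
-- ) -> tuple:
--     """
--     Find the tournament champion and return full match history.
--
--     Returns:
--         Tuple of (champion_name, match_history)
--         where match_history is list of (winner, loser) for each match
--     """
--     participants = [team for pair in bracket for team in pair]
--     match_history = []
--
--     # Process preliminary rounds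
--     for round_results in results:
--         winners = []
--         for match_idx, result in enumerate(round_results):
--             team1 = participants[match_idx * 2]
--             team2 = participants[match_idx * 2 + 1]
--             if result == 1:
--                 winners.append(team1)
--                 match_history.append((team1, team2))
--             else:
--                 winners.append(team2)
--                 match_history.append((team2, team1))
--         participants = winners
--
--     # Finals
--     finalist1, finalist2 = participants[0], participants[1]
--     if finals_result == 1:
--         champion = finalist1
--         match_history.append((finalist1, finalist2))
--     else:
--         champion = finalist2
--         match_history.append((finalist2, finalist1))
--
--     return champion, match_history
-- ===== SOURCE B (Python) =====
-- def tournament_bracket_winner_with_history(bracket, results, finals_result):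
--     participants = [team for pair in bracket for team in pair]
--     history = []
--     for codes in results + [[finals_result]]:
--         winners = []
--         remaining = participants
--         for r in codes:
--             t1, t2, remaining = remaining[0], remaining[1], remaining[2:]
--             w, l = (t1, t2) if r == 1 else (t2, t1)
--             winners.append(w)
--             history.append((w, l))
--         participants = winners
--     return participants[0], history
-- ===== Notes on version B (the rewrite author's own statement) =====
-- stated objective: simpler
-- what changed: B folds the separate finals block into one uniform loop over results + [[finals_result]] and pairs teams by destructuring the front of the participant list (consuming two at a time) instead of enumerate-based index arithmetic.
import Mathlib
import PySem

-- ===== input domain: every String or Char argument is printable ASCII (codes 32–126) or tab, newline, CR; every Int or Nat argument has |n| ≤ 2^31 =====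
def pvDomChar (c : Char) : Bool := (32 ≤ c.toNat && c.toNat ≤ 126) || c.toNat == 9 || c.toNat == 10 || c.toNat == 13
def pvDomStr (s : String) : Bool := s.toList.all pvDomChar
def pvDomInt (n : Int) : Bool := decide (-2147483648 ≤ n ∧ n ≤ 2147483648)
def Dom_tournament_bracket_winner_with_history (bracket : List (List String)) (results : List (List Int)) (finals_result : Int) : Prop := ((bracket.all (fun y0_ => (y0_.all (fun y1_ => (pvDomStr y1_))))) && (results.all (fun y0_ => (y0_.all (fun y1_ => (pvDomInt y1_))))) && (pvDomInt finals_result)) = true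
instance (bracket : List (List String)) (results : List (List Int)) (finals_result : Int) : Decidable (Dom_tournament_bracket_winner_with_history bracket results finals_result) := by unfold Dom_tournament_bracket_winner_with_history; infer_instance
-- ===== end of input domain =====

-- B folds the separate finals block into one uniform loop over results ++ [[finals_result]] and pairs
-- teams by consuming two from the front of the participant list instead of enumerate-index arithmetic
-- (objective: simpler).

-- ===== PORT A =====
-- one match of a preliminary round: indexes the round's participants by match index (A's inner loop body)
def stepA (ps : List String) (acc : List String × List (String × String)) (p : Int × Int) :
    List String × List (String × String) :=
  let team1 := (PySem.List.pyGet? ps (p.1 * 2)).getD ""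
  let team2 := (PySem.List.pyGet? ps (p.1 * 2 + 1)).getD ""
  if p.2 == 1 then (acc.1 ++ [team1], acc.2 ++ [(team1, team2)])
  else (acc.1 ++ [team2], acc.2 ++ [(team2, team1)])

def tournament_bracket_winner_with_history (bracket : List (List String)) (results : List (List Int)) (finals_result : Int) : String × (List (String × String)) :=
  let participants := bracket.flatten
  let st := results.foldl
    (fun (st : List String × List (String × String)) round_results =>
      (PySem.List.enumerate round_results).foldl (stepA st.1) ([], st.2))
    (participants, [])
  let finalist1 := (PySem.List.pyGet? st.1 0).getD ""
  let finalist2 := (PySem.List.pyGet? st.1 1).getD ""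
  if finals_result == 1 then (finalist1, st.2 ++ [(finalist1, finalist2)])
  else (finalist2, st.2 ++ [(finalist2, finalist1)])

-- ===== PORT B =====
-- one match of any round: takes the two front teams off `remaining` (B's inner loop body);
-- state is (winners, remaining, history)
def stepB (acc : List String × List String × List (String × String)) (r : Int) :
    List String × List String × List (String × String) :=
  let t1 := (PySem.List.pyGet? acc.2.1 0).getD ""
  let t2 := (PySem.List.pyGet? acc.2.1 1).getD ""
  let remaining := PySem.List.slice acc.2.1 (some 2) none
  let wl := if r == 1 then (t1, t2) else (t2, t1)
  (acc.1 ++ [wl.1], remaining, acc.2.2 ++ [wl])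

def tournament_bracket_winner_with_history_alt (bracket : List (List String)) (results : List (List Int)) (finals_result : Int) : String × (List (String × String)) :=
  let st := (results ++ [[finals_result]]).foldl
    (fun (st : List String × List (String × String)) codes =>
      let inner := codes.foldl stepB ([], st.1, st.2)
      (inner.1, inner.2.2))
    (bracket.flatten, [])
  ((PySem.List.pyGet? st.1 0).getD "", st.2)

-- ===== PRECONDITION & SPEC =====
-- chainOK n rounds: starting from n participants, each round has at most half as many results as
-- participants remaining (so every indexed access is in range), and at least 2 teams reach the finals.
def chainOK : Nat → List (List Int) → Bool
  | n, [] => decide (2 ≤ n)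
  | n, r :: rs => decide (2 * r.length ≤ n) && chainOK r.length rs

-- Pre_ excludes exactly the inputs where the Python A raises IndexError (a round with more results
-- than available pairs, or fewer than two finalists); B's Python raises on exactly the same inputs.
def Pre_tournament_bracket_winner_with_history (bracket : List (List String)) (results : List (List Int)) (finals_result : Int) : Prop :=
  chainOK bracket.flatten.length results = true
instance (bracket : List (List String)) (results : List (List Int)) (finals_result : Int) : Decidable (Pre_tournament_bracket_winner_with_history bracket results finals_result) := by unfold Pre_tournament_bracket_winner_with_history; infer_instance

def pvWitness_tournament_bracket_winner_with_history : List (List String) × List (List Int) × Int :=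
  ([["a", "b"], ["c", "d"]], [[1, 2]], 2)

def Spec_tournament_bracket_winner_with_history (bracket : List (List String)) (results : List (List Int)) (finals_result : Int) (out : String × (List (String × String))) : Prop := out = tournament_bracket_winner_with_history_alt bracket results finals_result
instance (bracket : List (List String)) (results : List (List Int)) (finals_result : Int) (out : String × (List (String × String))) : Decidable (Spec_tournament_bracket_winner_with_history bracket results finals_result out) := by unfold Spec_tournament_bracket_winner_with_history; infer_instance

-- ===== CLAIM (what is proved, stated in full; the proofs are below) =====
def Claim_equal_tournament_bracket_winner_with_history : Prop := ∀ (bracket : List (List String)) (results : List (List Int)) (finals_result : Int), Dom_tournament_bracket_winner_with_history bracket results finals_result → Pre_tournament_bracket_winner_with_history bracket results finals_result → Spec_tournament_bracket_winner_with_history bracket results finals_result (tournament_bracket_winner_with_history bracket results finals_result)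

-- ===== LEMMAS AND PROOFS =====

-- reference description of one round: pair off the front, one tuple per result code
def playRound : List String → List Int → List (String × String)
  | t1 :: t2 :: ps, r :: rs => (if r = 1 then (t1, t2) else (t2, t1)) :: playRound ps rs
  | _, _ => []

theorem playRound_nil (ps : List String) : playRound ps [] = [] := by
  cases ps with
  | nil => rfl
  | cons a t => cases t <;> rfl

-- reference description of the whole preliminary phase
def runRounds : List String → List (String × String) → List (List Int) → List String × List (String × String)
  | ps, h, [] => (ps, h)
  | ps, h, c :: cs => runRounds ((playRound ps c).map Prod.fst) (h ++ playRound ps c) cs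

theorem length_playRound (codes : List Int) (ps : List String)
    (h : 2 * codes.length ≤ ps.length) : (playRound ps codes).length = codes.length := by
  induction codes generalizing ps with
  | nil => simp [playRound_nil]
  | cons r rs ih =>
    match ps, h with
    | t1 :: t2 :: ps', h =>
      simp only [playRound, List.length_cons]
      rw [ih ps' (by simpa [Nat.mul_add] using h)]

theorem innerA_eq (codes : List Int) (ps : List String) :
    ∀ (k : Nat) (ws : List String) (h : List (String × String)),
    2 * (k + codes.length) ≤ ps.length →
    (PySem.List.enumerate codes (k : Int)).foldl (stepA ps) (ws, h) =
      (ws ++ (playRound (ps.drop (2 * k)) codes).map Prod.fst,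
       h ++ playRound (ps.drop (2 * k)) codes) := by
  induction codes with
  | nil =>
    intro k ws h _
    simp [PySem.List.enumerate_nil, playRound_nil]
  | cons r rs ih =>
    intro k ws h hlen
    have h2k1 : 2 * k + 1 < ps.length := by simp [List.length_cons] at hlen; omega
    have h2k : 2 * k < ps.length := by omega
    have hdrop : ps.drop (2 * k) = ps[2 * k] :: ps.drop (2 * k + 1) :=
      List.drop_eq_getElem_cons h2k
    have hdrop1 : ps.drop (2 * k + 1) = ps[2 * k + 1] :: ps.drop (2 * k + 2) :=
      List.drop_eq_getElem_cons h2k1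
    have hget1 : PySem.List.pyGet? ps ((k : Int) * 2) = some ps[2 * k] := by
      have : ((k : Int) * 2) = ((2 * k : Nat) : Int) := by push_cast; ring
      rw [this, PySem.List.pyGet?_natCast, List.getElem?_eq_getElem h2k]
    have hget2 : PySem.List.pyGet? ps ((k : Int) * 2 + 1) = some ps[2 * k + 1] := by
      have : ((k : Int) * 2 + 1) = ((2 * k + 1 : Nat) : Int) := by push_cast; ring
      rw [this, PySem.List.pyGet?_natCast, List.getElem?_eq_getElem h2k1]
    have hrec := ih (k + 1) (ws ++ [if r = 1 then ps[2 * k] else ps[2 * k + 1]])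
      (h ++ [if r = 1 then (ps[2 * k], ps[2 * k + 1]) else (ps[2 * k + 1], ps[2 * k])])
      (by simp [List.length_cons] at hlen ⊢; omega)
    rw [PySem.List.enumerate_cons, List.foldl_cons]
    have hstep : stepA ps (ws, h) ((k : Int), r) =
        (ws ++ [if r = 1 then ps[2 * k] else ps[2 * k + 1]],
         h ++ [if r = 1 then (ps[2 * k], ps[2 * k + 1]) else (ps[2 * k + 1], ps[2 * k])]) := by
      simp only [stepA, hget1, hget2, Option.getD_some]
      by_cases hr : r = 1 <;> simp [hr]
    rw [hstep]
    have hk1 : ((k : Int) + 1) = ((k + 1 : Nat) : Int) := by push_cast; ring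
    rw [hk1, hrec]
    rw [hdrop, hdrop1]
    simp only [playRound]
    have h22 : 2 * (k + 1) = 2 * k + 2 := by ring
    rw [h22]
    by_cases hr : r = 1 <;> simp [hr, List.append_assoc]

theorem innerB_eq (codes : List Int) :
    ∀ (rem ws : List String) (h : List (String × String)),
    2 * codes.length ≤ rem.length →
    codes.foldl stepB (ws, rem, h) =
      (ws ++ (playRound rem codes).map Prod.fst, rem.drop (2 * codes.length),
       h ++ playRound rem codes) := by
  induction codes with
  | nil =>
    intro rem ws h _
    simp [playRound_nil]
  | cons r rs ih =>
    intro rem ws h hlen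
    match rem, hlen with
    | t1 :: t2 :: rem', hlen =>
      have hstep : stepB (ws, t1 :: t2 :: rem', h) r =
          (ws ++ [if r = 1 then t1 else t2], rem',
           h ++ [if r = 1 then (t1, t2) else (t2, t1)]) := by
        simp only [stepB, PySem.List.pyGet?_zero_cons]
        have : PySem.List.pyGet? (t1 :: t2 :: rem') 1 = some t2 := by
          simp [PySem.List.pyGet?, PySem.List.pyIdx?]
        rw [this]
        have hsl : PySem.List.slice (t1 :: t2 :: rem') (some 2) none = rem' := by
          have : (2 : Int) = ((2 : Nat) : Int) := by norm_num
          rw [this, PySem.List.slice_from_natCast]; rfl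
        rw [hsl]
        by_cases hr : r = 1 <;> simp [hr]
      rw [List.foldl_cons, hstep,
        ih rem' _ _ (by simp [List.length_cons] at hlen ⊢; omega)]
      simp only [playRound]
      have : 2 * (r :: rs).length = 2 * rs.length + 2 := by simp [List.length_cons]; ring
      rw [this]
      by_cases hr : r = 1 <;> simp [hr, List.append_assoc]

theorem foldA_eq_run (results : List (List Int)) :
    ∀ (ps : List String) (h : List (String × String)),
    chainOK ps.length results = true →
    results.foldl
      (fun (st : List String × List (String × String)) round_results =>
        (PySem.List.enumerate round_results).foldl (stepA st.1) ([], st.2))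
      (ps, h) = runRounds ps h results := by
  induction results with
  | nil => intro ps h _; simp [runRounds]
  | cons c cs ih =>
    intro ps h hc
    simp only [chainOK, Bool.and_eq_true, decide_eq_true_eq] at hc
    have hstep := innerA_eq c ps 0 [] h (by simpa using hc.1)
    simp only [List.foldl_cons]
    rw [show ((0 : Nat) : Int) = 0 by norm_num] at hstep
    simp only [Nat.mul_zero, List.drop_zero, List.nil_append] at hstep
    rw [hstep, runRounds, ih]
    rw [List.length_map, length_playRound c ps hc.1]
    exact hc.2

theorem foldB_eq_run (results : List (List Int)) :
    ∀ (ps : List String) (h : List (String × String)),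
    chainOK ps.length results = true →
    results.foldl
      (fun (st : List String × List (String × String)) codes =>
        let inner := codes.foldl stepB ([], st.1, st.2)
        (inner.1, inner.2.2))
      (ps, h) = runRounds ps h results := by
  induction results with
  | nil => intro ps h _; simp [runRounds]
  | cons c cs ih =>
    intro ps h hc
    simp only [chainOK, Bool.and_eq_true, decide_eq_true_eq] at hc
    simp only [List.foldl_cons]
    rw [innerB_eq c ps [] h hc.1]
    simp only [List.nil_append]
    rw [runRounds, ih]
    rw [List.length_map, length_playRound c ps hc.1]
    exact hc.2

theorem run_len (results : List (List Int)) :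
    ∀ (ps : List String) (h : List (String × String)),
    chainOK ps.length results = true → 2 ≤ (runRounds ps h results).1.length := by
  induction results with
  | nil =>
    intro ps h hc
    simp only [chainOK, decide_eq_true_eq] at hc
    simpa [runRounds] using hc
  | cons c cs ih =>
    intro ps h hc
    simp only [chainOK, Bool.and_eq_true, decide_eq_true_eq] at hc
    rw [runRounds]
    apply ih
    rw [List.length_map, length_playRound c ps hc.1]
    exact hc.2

-- ===== VERDICT (by name: the statement is the Claim_ definition above) =====
theorem tournament_bracket_winner_with_history_spec : Claim_equal_tournament_bracket_winner_with_history := by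
  intro bracket results finals_result _ hpre
  unfold Spec_tournament_bracket_winner_with_history
  unfold Pre_tournament_bracket_winner_with_history at hpre
  simp only [tournament_bracket_winner_with_history, tournament_bracket_winner_with_history_alt,
    List.foldl_append, List.foldl_cons, List.foldl_nil]
  rw [foldA_eq_run results bracket.flatten [] hpre, foldB_eq_run results bracket.flatten [] hpre]
  have hlen : 2 ≤ (runRounds bracket.flatten [] results).1.length :=
    run_len results bracket.flatten [] hpre
  set st := runRounds bracket.flatten [] results with hst
  rcases hm : st.1 with _ | ⟨p0, _ | ⟨p1, rest⟩⟩
  · rw [hm] at hlen; simp at hlen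
  · rw [hm] at hlen; simp at hlen
  · have hstep : stepB ([], p0 :: p1 :: rest, st.2) finals_result =
        ([if finals_result = 1 then p0 else p1], rest,
         st.2 ++ [if finals_result = 1 then (p0, p1) else (p1, p0)]) := by
      simp only [stepB, PySem.List.pyGet?_zero_cons]
      have h1 : PySem.List.pyGet? (p0 :: p1 :: rest) 1 = some p1 := by
        simp [PySem.List.pyGet?, PySem.List.pyIdx?]
      rw [h1]
      have hsl : PySem.List.slice (p0 :: p1 :: rest) (some 2) none = rest := by
        have h2 : (2 : Int) = ((2 : Nat) : Int) := by norm_num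
        rw [h2, PySem.List.slice_from_natCast]; rfl
      rw [hsl]
      by_cases hr : finals_result = 1 <;> simp [hr]
    rw [hstep]
    have hg0 : PySem.List.pyGet? (p0 :: p1 :: rest) 0 = some p0 :=
      PySem.List.pyGet?_zero_cons _ _
    have hg1 : PySem.List.pyGet? (p0 :: p1 :: rest) 1 = some p1 := by
      simp [PySem.List.pyGet?, PySem.List.pyIdx?]
    rw [hg0, hg1]
    by_cases hr : finals_result = 1 <;> simp [hr]
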